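-- pv_equiv track=rewrite | github.com/GritskovaKseniya/doc-classificator | scan_docs_and_summarize.py | should_skip_folder
-- ===== SOURCE A (Python) =====
-- from typing import Any, Dict, Iterable, List, Optional, Sequence, Set, Tuple
--
-- def should_skip_folder(current_parts: Sequence[str], excluded: List[Tuple[str, ...]]) -> bool:
--     """Return True if current relative path contains any excluded path parts."""
--     for parts in excluded:
--         if not parts:
--             continue
--         for idx in range(0, len(current_parts) - len(parts) + 1):
--             if tuple(current_parts[idx : idx + len(parts)]) == parts:
--                 return True
--     return False
-- ===== SOURCE B (Python) =====
-- def should_skip_folder(current_parts, excluded):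
--     """Return True if current relative path contains any excluded path parts.
--
--     Index the non-empty excluded patterns by their first element, then scan
--     the positions of current_parts once, dispatching through the index.
--     """
--     index = {}
--     for parts in excluded:
--         if parts:
--             index.setdefault(parts[0], []).append(tuple(parts))
--     for idx, part in enumerate(current_parts):
--         for cand in index.get(part, ()):
--             if tuple(current_parts[idx: idx + len(cand)]) == cand:
--                 return True
--     return False
-- ===== Notes on version B (the rewrite author's own statement) =====
-- stated objective: faster
-- what changed: Instead of rescanning all positions of current_parts for each excluded pattern, B builds a dict mapping each pattern's first path part to the patterns starting with it, then scans the positions once and only compares slices against patterns whose first element occurs there.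
import Mathlib
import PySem

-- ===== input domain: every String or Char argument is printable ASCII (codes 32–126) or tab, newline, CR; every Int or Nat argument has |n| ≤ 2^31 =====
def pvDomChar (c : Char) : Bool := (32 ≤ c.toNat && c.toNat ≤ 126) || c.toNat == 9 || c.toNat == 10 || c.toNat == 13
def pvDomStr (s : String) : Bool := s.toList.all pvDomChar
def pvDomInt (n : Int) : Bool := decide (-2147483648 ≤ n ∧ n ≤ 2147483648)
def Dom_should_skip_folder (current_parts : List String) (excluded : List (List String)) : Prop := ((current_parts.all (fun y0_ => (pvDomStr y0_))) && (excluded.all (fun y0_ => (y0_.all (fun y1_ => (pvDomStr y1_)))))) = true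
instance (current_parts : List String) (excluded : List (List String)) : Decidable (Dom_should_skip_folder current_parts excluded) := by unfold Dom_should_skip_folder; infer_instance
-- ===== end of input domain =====

-- B replaces A's per-pattern rescan of all positions by a single scan of the
-- positions dispatching through a dict indexed by each pattern's first element.

-- ===== PORT A =====
-- inner loop: for idx in range(...): if tuple(current_parts[idx:idx+len(parts)]) == parts: return True
def aScan (cp parts : List String) : List Int → Bool
  | [] => false
  | i :: rest =>
    if PySem.List.slice cp (some i) (some (i + (parts.length : Int))) = parts then true
    else aScan cp parts rest

def should_skip_folder (current_parts : List String) (excluded : List (List String)) : Bool :=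
  match excluded with
  | [] => false
  | parts :: rest =>
    if parts = [] then should_skip_folder current_parts rest
    else if aScan current_parts parts
        (PySem.List.pyRange 0 ((current_parts.length : Int) - (parts.length : Int) + 1) 1) then
      true
    else should_skip_folder current_parts rest

-- ===== PORT B =====
-- index.setdefault(parts[0], []).append(tuple(parts)) over the excluded patterns
def bBuild (d : PySem.Dict String (List (List String))) : List (List String) → PySem.Dict String (List (List String))
  | [] => d
  | parts :: rest =>
    match parts with
    | [] => bBuild d rest
    | h :: _ => bBuild (d.modify h [] (· ++ [parts])) rest

-- for cand in index.get(part, ()): if tuple(current_parts[idx:idx+len(cand)]) == cand: return True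
def bMatch (cp : List String) (i : Int) : List (List String) → Bool
  | [] => false
  | cand :: rest =>
    if PySem.List.slice cp (some i) (some (i + (cand.length : Int))) = cand then true
    else bMatch cp i rest

-- for idx, part in enumerate(current_parts): …
def bScan (cp : List String) (d : PySem.Dict String (List (List String))) : List (Int × String) → Bool
  | [] => false
  | (i, part) :: rest =>
    if bMatch cp i (d.getD part []) then true else bScan cp d rest

def should_skip_folder_alt (current_parts : List String) (excluded : List (List String)) : Bool :=
  bScan current_parts (bBuild PySem.Dict.empty excluded) (PySem.List.enumerate current_parts 0)

-- ===== PRECONDITION & SPEC =====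
def Spec_should_skip_folder (current_parts : List String) (excluded : List (List String)) (out : Bool) : Prop := out = should_skip_folder_alt current_parts excluded
instance (current_parts : List String) (excluded : List (List String)) (out : Bool) : Decidable (Spec_should_skip_folder current_parts excluded out) := by unfold Spec_should_skip_folder; infer_instance

-- ===== CLAIM (what is proved, stated in full; the proofs are below) =====
def Claim_equal_should_skip_folder : Prop := ∀ (current_parts : List String) (excluded : List (List String)), Dom_should_skip_folder current_parts excluded → Spec_should_skip_folder current_parts excluded (should_skip_folder current_parts excluded)

-- ===== LEMMAS AND PROOFS =====

theorem aScan_iff (cp parts : List String) (l : List Int) :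
    aScan cp parts l = true ↔
      ∃ i ∈ l, PySem.List.slice cp (some i) (some (i + (parts.length : Int))) = parts := by
  induction l with
  | nil => simp [aScan]
  | cons i rest ih =>
    by_cases h : PySem.List.slice cp (some i) (some (i + (parts.length : Int))) = parts
    · simp [aScan, h]
    · simp [aScan, h, ih]

theorem bMatch_iff (cp : List String) (i : Int) (l : List (List String)) :
    bMatch cp i l = true ↔
      ∃ cand ∈ l, PySem.List.slice cp (some i) (some (i + (cand.length : Int))) = cand := by
  induction l with
  | nil => simp [bMatch]
  | cons cand rest ih =>
    by_cases h : PySem.List.slice cp (some i) (some (i + (cand.length : Int))) = cand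
    · exact ⟨fun _ => ⟨cand, by simp, h⟩, fun _ => by simp [bMatch, h]⟩
    · simp [bMatch, h, ih]

theorem bScan_iff (cp : List String) (d : PySem.Dict String (List (List String)))
    (l : List (Int × String)) :
    bScan cp d l = true ↔ ∃ p ∈ l, bMatch cp p.1 (d.getD p.2 []) = true := by
  induction l with
  | nil => simp [bScan]
  | cons p rest ih =>
    by_cases h : bMatch cp p.1 (d.getD p.2 []) = true
    · refine ⟨fun _ => ⟨p, by simp, h⟩, fun _ => ?_⟩
      obtain ⟨i, part⟩ := p
      simp only [bScan]
      rw [if_pos h]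
    · cases p with
      | mk i part =>
        simp only [bScan, List.mem_cons]
        rw [if_neg h, ih]
        constructor
        · rintro ⟨q, hq, hm⟩; exact ⟨q, Or.inr hq, hm⟩
        · rintro ⟨q, hq | hq, hm⟩
          · subst hq; exact absurd hm h
          · exact ⟨q, hq, hm⟩

theorem bBuild_getD (d : PySem.Dict String (List (List String))) (ex : List (List String))
    (k : String) (cand : List String) :
    cand ∈ (bBuild d ex).getD k [] ↔
      cand ∈ d.getD k [] ∨ (cand ∈ ex ∧ cand.head? = some k) := by
  induction ex generalizing d with
  | nil => simp [bBuild]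
  | cons parts rest ih =>
    cases parts with
    | nil =>
      simp only [bBuild, ih, List.mem_cons]
      constructor
      · rintro (hm | hm)
        · exact Or.inl hm
        · exact Or.inr ⟨Or.inr hm.1, hm.2⟩
      · rintro (hm | ⟨hm | hm, hh⟩)
        · exact Or.inl hm
        · exfalso; subst hm; simp at hh
        · exact Or.inr ⟨hm, hh⟩
    | cons h t =>
      simp only [bBuild]
      rw [ih, PySem.Dict.getD_modify]
      by_cases hk : k = h
      · subst hk
        rw [if_pos rfl]
        simp only [List.mem_append, List.mem_cons, List.not_mem_nil, or_false]
        constructor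
        · rintro ((hm | hm) | hm)
          · exact Or.inl hm
          · subst hm; exact Or.inr ⟨Or.inl rfl, rfl⟩
          · exact Or.inr ⟨Or.inr hm.1, hm.2⟩
        · rintro (hm | ⟨hm | hm, hh⟩)
          · exact Or.inl (Or.inl hm)
          · subst hm; exact Or.inl (Or.inr rfl)
          · exact Or.inr ⟨hm, hh⟩
      · rw [if_neg hk]
        simp only [List.mem_cons]
        constructor
        · rintro (hm | hm)
          · exact Or.inl hm
          · exact Or.inr ⟨Or.inr hm.1, hm.2⟩
        · rintro (hm | ⟨hm | hm, hh⟩)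
          · exact Or.inl hm
          · exfalso; apply hk; subst hm; simp only [List.head?_cons, Option.some.injEq] at hh
            exact hh.symm
          · exact Or.inr ⟨hm, hh⟩

-- the canonical "pattern cand occurs at position k" predicate
def HitAt (cp cand : List String) (k : Nat) : Prop :=
  k < cp.length ∧ cand.head? = cp[k]? ∧ (cp.drop k).take cand.length = cand

-- A's inner loop finds cand iff it occurs at some position
theorem A_inner_iff (cp cand : List String) (hne : cand ≠ []) :
    (∃ i ∈ PySem.List.pyRange 0 ((cp.length : Int) - (cand.length : Int) + 1) 1,
        PySem.List.slice cp (some i) (some (i + (cand.length : Int))) = cand) ↔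
      ∃ k : Nat, HitAt cp cand k := by
  have hL : 0 < cand.length := List.length_pos_iff.mpr hne
  constructor
  · rintro ⟨i, hi, hs⟩
    rw [PySem.List.mem_pyRange_one] at hi
    obtain ⟨h0, hlt⟩ := hi
    obtain ⟨k, rfl⟩ := Int.eq_ofNat_of_zero_le h0
    have hkL : k + cand.length ≤ cp.length := by omega
    have hk : k < cp.length := by omega
    rw [PySem.List.slice_natCast_add] at hs
    refine ⟨k, hk, ?_, hs⟩
    have : ((cp.drop k).take cand.length).head? = cand.head? := by rw [hs]
    rw [List.head?_take, if_neg (by omega)] at this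
    rw [← this, List.head?_drop, List.getElem?_eq_getElem hk]
  · rintro ⟨k, hk, hh, hs⟩
    have hlen : ((cp.drop k).take cand.length).length = cand.length := by rw [hs]
    simp only [List.length_take, List.length_drop] at hlen
    have hkL : k + cand.length ≤ cp.length := by omega
    refine ⟨(k : Int), ?_, ?_⟩
    · rw [PySem.List.mem_pyRange_one]
      refine ⟨Int.natCast_nonneg k, ?_⟩
      omega
    · rw [PySem.List.slice_natCast_add]; exact hs

-- A's boolean characterisation
theorem ssf_cons (cp parts : List String) (rest : List (List String)) :
    should_skip_folder cp (parts :: rest) =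
      if parts = [] then should_skip_folder cp rest
      else (aScan cp parts
          (PySem.List.pyRange 0 ((cp.length : Int) - (parts.length : Int) + 1) 1)
        || should_skip_folder cp rest) := by
  simp only [should_skip_folder]
  by_cases hnil : parts = []
  · rw [if_pos hnil, if_pos hnil]
  · rw [if_neg hnil, if_neg hnil]
    by_cases hin : aScan cp parts
        (PySem.List.pyRange 0 ((cp.length : Int) - (parts.length : Int) + 1) 1) = true
    · rw [if_pos hin, hin, Bool.true_or]
    · rw [if_neg hin]
      rw [Bool.not_eq_true] at hin
      rw [hin, Bool.false_or]

theorem A_iff (cp : List String) (ex : List (List String)) :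
    should_skip_folder cp ex = true ↔
      ∃ cand ∈ ex, cand ≠ [] ∧ ∃ k : Nat, HitAt cp cand k := by
  induction ex with
  | nil => simp [should_skip_folder]
  | cons parts rest ih =>
    rw [ssf_cons]
    by_cases hnil : parts = []
    · rw [if_pos hnil, ih]
      subst hnil
      constructor
      · rintro ⟨c, hc, hm⟩; exact ⟨c, List.mem_cons_of_mem _ hc, hm⟩
      · rintro ⟨c, hc, hne, hm⟩
        rcases List.mem_cons.mp hc with hc | hc
        · exact absurd hc hne
        · exact ⟨c, hc, hne, hm⟩
    · rw [if_neg hnil, Bool.or_eq_true, ih, aScan_iff]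
      constructor
      · rintro (hin | ⟨c, hc, hm⟩)
        · exact ⟨parts, List.mem_cons_self, hnil, (A_inner_iff cp parts hnil).mp hin⟩
        · exact ⟨c, List.mem_cons_of_mem _ hc, hm⟩
      · rintro ⟨c, hc, hne, hm⟩
        rcases List.mem_cons.mp hc with hc | hc
        · subst hc; exact Or.inl ((A_inner_iff cp c hne).mpr hm)
        · exact Or.inr ⟨c, hc, hne, hm⟩

-- B's boolean characterisation
theorem B_iff (cp : List String) (ex : List (List String)) :
    should_skip_folder_alt cp ex = true ↔
      ∃ cand ∈ ex, cand ≠ [] ∧ ∃ k : Nat, HitAt cp cand k := by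
  unfold should_skip_folder_alt
  rw [bScan_iff]
  constructor
  · rintro ⟨p, hp, hm⟩
    rw [PySem.List.mem_enumerate_iff] at hp
    obtain ⟨k, hk, rfl⟩ := hp
    rw [bMatch_iff] at hm
    obtain ⟨cand, hcand, hs⟩ := hm
    rw [bBuild_getD] at hcand
    rcases hcand with hcand | ⟨hmem, hhead⟩
    · simp [PySem.Dict.getD_empty] at hcand
    · have hne : cand ≠ [] := by intro h; subst h; simp at hhead
      simp only [zero_add] at hs
      rw [PySem.List.slice_natCast_add] at hs
      refine ⟨cand, hmem, hne, k, hk, ?_, hs⟩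
      rw [hhead, List.getElem?_eq_getElem hk]
  · rintro ⟨cand, hmem, hne, k, hk, hhead, hs⟩
    refine ⟨((0 : Int) + (k : Nat), cp[k]), ?_, ?_⟩
    · rw [PySem.List.mem_enumerate_iff]; exact ⟨k, hk, rfl⟩
    · rw [bMatch_iff]
      refine ⟨cand, ?_, ?_⟩
      · rw [bBuild_getD]
        refine Or.inr ⟨hmem, ?_⟩
        rw [hhead, List.getElem?_eq_getElem hk]
      · simp only [zero_add]
        rw [PySem.List.slice_natCast_add]; exact hs

-- ===== VERDICT (by name: the statement is the Claim_ definition above) =====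
theorem should_skip_folder_spec : Claim_equal_should_skip_folder := by
  intro cp ex _
  unfold Spec_should_skip_folder
  have h := (A_iff cp ex).trans (B_iff cp ex).symm
  cases hA : should_skip_folder cp ex <;> cases hB : should_skip_folder_alt cp ex <;>
    simp_all
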